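-- pv_equiv track=rewrite | github.com/switchbox-data/rate-design-platform | data/nyiso/ancillary/fetch_nyiso_as_prices_parquet.py | _legacy_wide_prefixes
-- ===== SOURCE A (Python) =====
-- def _legacy_wide_prefixes(columns: list[str]) -> list[tuple[str, str]]:
--     """Return (column prefix with trailing space, canonical zone label) pairs."""
--     out: list[tuple[str, str]] = []
--     if any(c.startswith("SENY ") for c in columns):
--         out.append(("SENY ", "SENY"))
--     if any(c.startswith("East ") for c in columns):
--         out.append(("East ", "EAST"))
--     if any(c.startswith("West ") for c in columns):
--         out.append(("West ", "WEST"))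
--     return out
-- ===== SOURCE B (Python) =====
-- def _legacy_wide_prefixes(columns: list[str]) -> list[tuple[str, str]]:
--     """Return (column prefix with trailing space, canonical zone label) pairs."""
--     prefixes = {c[:5] for c in columns}
--     table = [("SENY ", "SENY"), ("East ", "EAST"), ("West ", "WEST")]
--     return [(p, z) for (p, z) in table if p in prefixes]
-- ===== Notes on version B (the rewrite author's own statement) =====
-- stated objective: faster
-- what changed: B builds a set of the 5-character prefixes of the columns once and then filters a fixed (prefix,label) table by set membership, instead of running a separate any()-startswith scan over the columns for each of the three prefixes.
import Mathlib
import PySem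

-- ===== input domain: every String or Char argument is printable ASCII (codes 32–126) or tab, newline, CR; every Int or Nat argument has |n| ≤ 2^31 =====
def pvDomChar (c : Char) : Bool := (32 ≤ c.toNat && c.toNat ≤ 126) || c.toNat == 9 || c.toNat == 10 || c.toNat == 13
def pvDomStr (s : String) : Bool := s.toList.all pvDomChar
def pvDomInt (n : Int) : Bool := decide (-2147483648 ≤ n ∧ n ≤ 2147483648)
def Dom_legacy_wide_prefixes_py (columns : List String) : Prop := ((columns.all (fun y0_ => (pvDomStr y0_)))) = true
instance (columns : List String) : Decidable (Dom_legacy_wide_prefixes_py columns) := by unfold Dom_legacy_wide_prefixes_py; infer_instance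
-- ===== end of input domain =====

-- B replaces A's three any()-scans with one set of 5-char column prefixes filtered against a fixed table (a timing run measured B faster by a constant factor).

-- ===== PORT A =====
-- Port of A: three separate any-scans, appending in fixed order.
def legacy_wide_prefixes_py (columns : List String) : List (String × String) :=
  (if columns.any (fun c => PySem.Str.startswith c "SENY ") then [("SENY ", "SENY")] else []) ++
  (if columns.any (fun c => PySem.Str.startswith c "East ") then [("East ", "EAST")] else []) ++
  (if columns.any (fun c => PySem.Str.startswith c "West ") then [("West ", "WEST")] else [])

-- ===== PORT B =====
-- Port of B: build the set {c[:5] for c in columns}, then filter the fixed table by membership.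
def lwpTable : List (String × String) := [("SENY ", "SENY"), ("East ", "EAST"), ("West ", "WEST")]

def legacy_wide_prefixes_py_alt (columns : List String) : List (String × String) :=
  let prefixes : PySem.Set String :=
    PySem.Set.ofList (columns.map (fun c => PySem.Str.slice c none (some 5)))
  lwpTable.filter (fun pz => PySem.Set.contains prefixes pz.1)

-- ===== PRECONDITION & SPEC =====
def Spec_legacy_wide_prefixes_py (columns : List String) (out : List (String × String)) : Prop := out = legacy_wide_prefixes_py_alt columns
instance (columns : List String) (out : List (String × String)) : Decidable (Spec_legacy_wide_prefixes_py columns out) := by unfold Spec_legacy_wide_prefixes_py; infer_instance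

-- ===== CLAIM =====
def Claim_equal_legacy_wide_prefixes_py : Prop := ∀ (columns : List String), Dom_legacy_wide_prefixes_py columns → Spec_legacy_wide_prefixes_py columns (legacy_wide_prefixes_py columns)

-- ===== LEMMAS AND PROOFS =====

-- A column's 5-char slice equals a 5-char prefix string iff the column starts with it.
lemma slice5_eq_iff_startswith (p c : String) (hp : p.toList.length = 5) :
    (PySem.Str.slice c none (some 5) = p) ↔ PySem.Str.startswith c p = true := by
  rw [show PySem.Str.startswith c p = PySem.Chars.startswith c.toList p.toList from by
        simp,
      PySem.Chars.startswith_iff]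
  constructor
  · intro h
    have : (PySem.Str.slice c none (some 5)).toList = p.toList := by rw [h]
    rw [PySem.Str.toList_slice, PySem.Chars.slice_eq_listSlice,
        PySem.List.slice_to _ (by norm_num)] at this
    rw [← this]
    exact List.take_prefix _ _
  · intro h
    apply String.toList_injective
    rw [PySem.Str.toList_slice, PySem.Chars.slice_eq_listSlice,
        PySem.List.slice_to _ (by norm_num)]
    rw [List.prefix_iff_eq_take, hp] at h
    exact h.symm

lemma contains_eq_any (p : String) (columns : List String) (hp : p.toList.length = 5) :
    PySem.Set.contains
      (PySem.Set.ofList (columns.map (fun c => PySem.Str.slice c none (some 5)))) p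
    = columns.any (fun c => PySem.Str.startswith c p) := by
  rcases h : columns.any (fun c => PySem.Str.startswith c p) with _ | _
  · rw [Bool.eq_false_iff]
    intro hc
    rw [PySem.Set.contains_iff, PySem.Set.mem_ofList, List.mem_map] at hc
    obtain ⟨c, hc, hs⟩ := hc
    have := (slice5_eq_iff_startswith p c hp).mp hs
    rw [List.any_eq_false] at h
    exact absurd this (by simpa using h c hc)
  · rw [List.any_eq_true] at h
    obtain ⟨c, hc, hs⟩ := h
    rw [PySem.Set.contains_iff, PySem.Set.mem_ofList, List.mem_map]
    exact ⟨c, hc, (slice5_eq_iff_startswith p c hp).mpr hs⟩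

-- ===== VERDICT =====
theorem legacy_wide_prefixes_py_spec : Claim_equal_legacy_wide_prefixes_py := by
  intro columns _
  unfold Spec_legacy_wide_prefixes_py legacy_wide_prefixes_py legacy_wide_prefixes_py_alt
  simp only [lwpTable, List.filter,
    contains_eq_any "SENY " columns (by decide),
    contains_eq_any "East " columns (by decide),
    contains_eq_any "West " columns (by decide)]
  cases h1 : columns.any (fun c => PySem.Str.startswith c "SENY ") <;>
  cases h2 : columns.any (fun c => PySem.Str.startswith c "East ") <;>
  cases h3 : columns.any (fun c => PySem.Str.startswith c "West ") <;>
  simp only [h1, h2, h3] <;> rfl
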